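-- pv_equiv track=rewrite | github.com/KartikAnandBhandari/PYTHON-WORKS | hamelting.py | calculate_hamming_code
-- ===== SOURCE A (Python) =====
-- def calculate_hamming_code(data_bits, parity_type="even"):
--     m = len(data_bits)
--     r = 0
--
--     while (2**r) < (m + r + 1):
--         r += 1
--
--
--     hamming_code = ['P'] * (m + r)
--     j = 0
--
--
--     for i in range(1, len(hamming_code) + 1):
--         if (i & (i - 1)) == 0:
--             continue
--         hamming_code[i - 1] = data_bits[j]
--         j += 1
--
--
--     for i in range(r):
--         parity_pos = 2**i
--         parity_bits = [hamming_code[j] for j in range(parity_pos - 1, len(hamming_code), 2 * parity_pos)]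
--         ones_count = sum(bit == '1' for bits in parity_bits for bit in bits)
--
--         if parity_type == "even":
--             parity_value = '0' if ones_count % 2 == 0 else '1'
--         else:
--             parity_value = '1' if ones_count % 2 == 0 else '0'
--
--         hamming_code[parity_pos - 1] = parity_value
--
--     return "".join(hamming_code)
-- ===== SOURCE B (Python) =====
-- def calculate_hamming_code(data_bits, parity_type="even"):
--     m = len(data_bits)
--     r = 0
--     while (2 ** r) < (m + r + 1):
--         r += 1
--
--     code = ['P'] * (m + r)
--     j = 0
--     for i in range(1, len(code) + 1):
--         if (i & (i - 1)) == 0: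
--             continue
--         code[i - 1] = data_bits[j]
--         j += 1
--
--     # One bucketing pass: position p belongs to the parity group given by the
--     # number of trailing zero bits of p+1 (equivalently, its lowest set bit).
--     counts = {}
--     for p in range(len(code)):
--         q = p + 1
--         tz = 0
--         while q % 2 == 0:
--             q //= 2
--             tz += 1
--         counts[tz] = counts.get(tz, 0) + code[p].count('1')
--
--     for i in range(r):
--         ones = counts.get(i, 0)
--         if parity_type == "even":
--             code[2 ** i - 1] = '0' if ones % 2 == 0 else '1'
--         else:
--             code[2 ** i - 1] = '1' if ones % 2 == 0 else '0'
--
--     return "".join(code)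
-- ===== Notes on version B (the rewrite author's own statement) =====
-- stated objective: alternative
-- what changed: The r strided parity scans over the (partially updated) code array are replaced by a single bucketing pass that classifies every position by the trailing-zero count of its 1-based index and accumulates per-parity-group ones-counts in a dict, which the final loop then reads.
import Mathlib
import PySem

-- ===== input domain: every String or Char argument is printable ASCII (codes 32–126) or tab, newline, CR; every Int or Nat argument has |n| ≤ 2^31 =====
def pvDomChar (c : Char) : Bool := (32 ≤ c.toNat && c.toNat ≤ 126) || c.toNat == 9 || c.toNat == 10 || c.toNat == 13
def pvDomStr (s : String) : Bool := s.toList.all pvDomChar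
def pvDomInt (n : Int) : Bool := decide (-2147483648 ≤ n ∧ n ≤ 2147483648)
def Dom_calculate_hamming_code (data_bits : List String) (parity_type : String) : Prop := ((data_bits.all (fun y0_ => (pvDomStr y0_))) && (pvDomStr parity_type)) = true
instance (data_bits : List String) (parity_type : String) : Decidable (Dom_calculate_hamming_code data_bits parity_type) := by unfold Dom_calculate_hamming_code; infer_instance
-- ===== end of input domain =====

-- B replaces A's r strided parity scans by one bucketing pass keyed by the trailing-zero
-- count of each 1-based position (objective: alternative algorithm, same exact output).

-- termination fact for the 'while (2**r) < (m + r + 1)' loop (cited by pvA_r/pvB_r)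
theorem pv_r_le_m (m r : Nat) (h : 2 ^ r < m + r + 1) : r ≤ m := by
  by_contra hc
  have hge : ∀ s, m + 1 ≤ s → m + s + 1 ≤ 2 ^ s := by
    intro s
    induction s with
    | zero => omega
    | succ s ih =>
      intro hs
      rcases Nat.lt_or_ge m (s + 1) with h1 | h1
      · by_cases hms : m + 1 ≤ s
        · have := ih hms
          have h1 : (1 : Nat) ≤ 2 ^ s := Nat.one_le_two_pow
          rw [pow_succ]; omega
        · have hms' : m = s := by omega
          subst hms'
          have h2 : m < 2 ^ m := Nat.lt_two_pow_self
          rw [pow_succ]; omega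
      · omega
  exact absurd (hge r (by omega)) (by omega)

-- ===== PORT A =====
-- while (2**r) < (m + r + 1): r += 1   (m, r are nonnegative Python ints)
def pvA_r (m r : Nat) : Nat :=
  if 2 ^ r < m + r + 1 then pvA_r m (r + 1) else r
termination_by m + 1 - r
decreasing_by have := pv_r_le_m m r (by assumption); omega

-- for i in range(1, len(hamming_code)+1): skip parity (power-of-two) positions, place next
-- data bit.  st = (hamming_code, j); j is always a valid index of data_bits when it is read,
-- so pyGetD's default is never used; i - 1 ≥ 0, so .toNat is exact.
def pvA_place (data_bits : List String) (code0 : List String) : List String :=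
  ((PySem.List.pyRange 1 (PySem.List.len code0 + 1) 1).foldl
    (fun (st : List String × Int) i =>
      if PySem.Int.band i (i - 1) = 0 then st
      else (st.1.set (i - 1).toNat (PySem.List.pyGetD data_bits st.2 ""), st.2 + 1))
    (code0, 0)).1

-- body of 'for i in range(r)': strided scan, then set the parity bit at 2**i - 1.
-- every j produced by the stride range is a valid nonnegative index, so pyGetD is exact.
def pvA_parityStep (parity_type : String) (code : List String) (i : Nat) : List String :=
  let parity_pos : Nat := 2 ^ i
  let parity_bits := (PySem.List.pyRange ((parity_pos : Int) - 1) (PySem.List.len code) (2 * (parity_pos : Int))).map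
    (fun j => PySem.List.pyGetD code j "")
  let ones_count := ((parity_bits.flatMap (fun bits => bits.toList)).map
    (fun bit => if bit == '1' then (1 : Int) else 0)).sum
  let parity_value := if parity_type == "even" then (if ones_count % 2 = 0 then "0" else "1")
                      else (if ones_count % 2 = 0 then "1" else "0")
  code.set (parity_pos - 1) parity_value

def calculate_hamming_code (data_bits : List String) (parity_type : String) : String :=
  let m := data_bits.length
  let r := pvA_r m 0
  let hamming0 : List String := List.replicate (m + r) "P"
  let placed := pvA_place data_bits hamming0
  -- for i in range(r)  (r ≥ 0, so List.range r is exact)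
  let final := (List.range r).foldl (pvA_parityStep parity_type) placed
  PySem.Str.join "" final

-- ===== PORT B =====
def pvB_r (m r : Nat) : Nat :=
  if 2 ^ r < m + r + 1 then pvB_r m (r + 1) else r
termination_by m + 1 - r
decreasing_by have := pv_r_le_m m r (by assumption); omega

def pvB_place (data_bits : List String) (code0 : List String) : List String :=
  ((PySem.List.pyRange 1 (PySem.List.len code0 + 1) 1).foldl
    (fun (st : List String × Int) i =>
      if PySem.Int.band i (i - 1) = 0 then st
      else (st.1.set (i - 1).toNat (PySem.List.pyGetD data_bits st.2 ""), st.2 + 1))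
    (code0, 0)).1

-- q = p + 1; while q % 2 == 0: q //= 2; tz += 1.  In B, q starts at p + 1 ≥ 1, so the
-- totality guard '1 ≤ q' holds on every reachable call and the port is exact there.
def pvB_tz (q : Int) : Nat :=
  if h : PySem.Int.mod q 2 = 0 ∧ 1 ≤ q then pvB_tz (PySem.Int.floordiv q 2) + 1 else 0
termination_by q.toNat
decreasing_by
  rw [PySem.Int.floordiv_eq_ediv_of_pos (by omega)]
  rcases h with ⟨h1, h2⟩
  rw [PySem.Int.mod_eq_emod_of_pos (by omega)] at h1
  omega

-- loop body of the bucketing pass: q = p + 1; tz = trailing zeros of q;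
-- counts[tz] = counts.get(tz, 0) + code[p].count('1').  The counts are Python ints that
-- stay nonnegative, so Nat values are exact; p from range(len(code)) is a valid
-- nonnegative index, so pyGetD is exact.
def pvB_countStep (code : List String) (d : PySem.Dict Nat Nat) (p : Int) : PySem.Dict Nat Nat :=
  let tz := pvB_tz (p + 1)
  d.insert tz (d.getD tz 0 + PySem.Str.count (PySem.List.pyGetD code p "") "1")

-- single bucketing pass over all positions
def pvB_counts (code : List String) : PySem.Dict Nat Nat :=
  (PySem.List.pyRange 0 (PySem.List.len code) 1).foldl (pvB_countStep code) PySem.Dict.empty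

-- body of the final 'for i in range(r)': read the bucket, set the parity bit.
def pvB_setStep (parity_type : String) (counts : PySem.Dict Nat Nat) (code : List String) (i : Nat) : List String :=
  let ones := counts.getD i 0
  code.set (2 ^ i - 1) (if parity_type == "even" then (if ones % 2 = 0 then "0" else "1")
                        else (if ones % 2 = 0 then "1" else "0"))

def calculate_hamming_code_alt (data_bits : List String) (parity_type : String) : String :=
  let m := data_bits.length
  let r := pvB_r m 0
  let code0 : List String := List.replicate (m + r) "P"
  let code := pvB_place data_bits code0
  let counts := pvB_counts code
  let final := (List.range r).foldl (pvB_setStep parity_type counts) code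
  PySem.Str.join "" final

-- ===== PRECONDITION & SPEC =====
def Spec_calculate_hamming_code (data_bits : List String) (parity_type : String) (out : String) : Prop := out = calculate_hamming_code_alt data_bits parity_type
instance (data_bits : List String) (parity_type : String) (out : String) : Decidable (Spec_calculate_hamming_code data_bits parity_type out) := by unfold Spec_calculate_hamming_code; infer_instance

-- ===== CLAIM (what is proved, stated in full; the proofs are below) =====
def Claim_equal_calculate_hamming_code : Prop := ∀ (data_bits : List String) (parity_type : String), Dom_calculate_hamming_code data_bits parity_type → Spec_calculate_hamming_code data_bits parity_type (calculate_hamming_code data_bits parity_type)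

-- ===== LEMMAS AND PROOFS =====

theorem pv_r_eq (m r : Nat) : pvB_r m r = pvA_r m r := by
  rw [pvB_r, pvA_r]
  split
  · exact pv_r_eq m (r + 1)
  · rfl
termination_by m + 1 - r
decreasing_by have := pv_r_le_m m r (by assumption); omega

theorem pv_place_eq (d c : List String) : pvB_place d c = pvA_place d c := rfl

-- Nat-level unfolding of the tz loop
theorem pv_tz_natCast (q : Nat) :
    pvB_tz (q : Int) = if q % 2 = 0 ∧ 1 ≤ q then pvB_tz ((q / 2 : Nat) : Int) + 1 else 0 := by
  rw [pvB_tz]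
  have h1 : PySem.Int.mod (q : Int) 2 = ((q % 2 : Nat) : Int) := by
    exact_mod_cast PySem.Int.mod_natCast q 2
  have h2 : PySem.Int.floordiv (q : Int) 2 = ((q / 2 : Nat) : Int) := by
    exact_mod_cast PySem.Int.floordiv_natCast q 2
  rw [h1, h2]
  by_cases hc : q % 2 = 0 ∧ 1 ≤ q
  · rw [dif_pos (by exact_mod_cast hc), if_pos hc]
  · rw [dif_neg (by intro h; exact hc (by exact_mod_cast h)), if_neg hc]

-- characterization of the trailing-zero count
theorem pv_tz_eq_iff (i : Nat) : ∀ q : Nat, 0 < q → (pvB_tz (q : Int) = i ↔ q % 2 ^ (i + 1) = 2 ^ i) := by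
  induction i with
  | zero =>
    intro q hq
    rw [pv_tz_natCast]
    by_cases h : q % 2 = 0 ∧ 1 ≤ q
    · simp only [if_pos h, zero_add, pow_one, pow_zero]
      constructor
      · intro hh; exact absurd hh (Nat.succ_ne_zero _)
      · intro hh; exact absurd h.1 (by omega)
    · rw [if_neg h]
      simp only [zero_add, pow_one, pow_zero, true_iff]
      omega
  | succ i ih =>
    intro q hq
    rw [pv_tz_natCast]
    have hdvd : (2 : Nat) ∣ 2 ^ (i + 1 + 1) := dvd_pow_self 2 (Nat.succ_ne_zero _)
    by_cases h : q % 2 = 0 ∧ 1 ≤ q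
    · simp only [if_pos h]
      have hq2 : 0 < q / 2 := by omega
      have hiff := ih (q / 2) hq2
      have hmul : q % 2 ^ (i + 1 + 1) = 2 * ((q / 2) % 2 ^ (i + 1)) := by
        have hq' : q = 2 * (q / 2) := by omega
        calc q % 2 ^ (i + 1 + 1) = (2 * (q / 2)) % (2 * 2 ^ (i + 1)) := by
              rw [← hq', pow_succ']
          _ = 2 * ((q / 2) % 2 ^ (i + 1)) := Nat.mul_mod_mul_left 2 _ _
      have hpow : (2 : Nat) ^ (i + 1) = 2 * 2 ^ i := by rw [pow_succ']
      omega
    · simp only [if_neg h]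
      have hodd : q % 2 = 1 := by omega
      have hmod : q % 2 ^ (i + 1 + 1) % 2 = q % 2 := Nat.mod_mod_of_dvd q hdvd
      have hp2 : (2 : Nat) ^ (i + 1) % 2 = 0 := by
        rw [pow_succ']; omega
      constructor
      · omega
      · intro hR
        rw [hR] at hmod
        omega

theorem pv_tz_two_pow (t : Nat) : pvB_tz ((2 ^ t : Nat) : Int) = t := by
  rw [pv_tz_eq_iff t (2 ^ t) (Nat.two_pow_pos t)]
  exact Nat.mod_eq_of_lt (Nat.pow_lt_pow_succ (by omega))

-- divisibility form of the bucket condition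
theorem pv_stride_char (r q : Nat) (hq : 2 ^ r ≤ q) :
    (2 ^ (r + 1) ∣ q - 2 ^ r) ↔ q % 2 ^ (r + 1) = 2 ^ r := by
  have hlt : (2 : Nat) ^ r < 2 ^ (r + 1) := Nat.pow_lt_pow_succ (by omega)
  constructor
  · rintro ⟨t, ht⟩
    have hq' : q = 2 ^ (r + 1) * t + 2 ^ r := by omega
    rw [hq', Nat.mul_add_mod]
    exact Nat.mod_eq_of_lt hlt
  · intro hm
    have := Nat.div_add_mod q (2 ^ (r + 1))
    exact ⟨q / 2 ^ (r + 1), by omega⟩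

-- the weighted counting loop: final bucket value = sum of weights of matching elements
theorem pv_getD_foldl_insert_add {β : Type} (l : List β) (k : β → Nat) (g : β → Nat)
    (d : PySem.Dict Nat Nat) (v : Nat) :
    (l.foldl (fun d x => d.insert (k x) (d.getD (k x) 0 + g x)) d).getD v 0
      = d.getD v 0 + ((l.filter (fun x => k x = v)).map g).sum := by
  induction l generalizing d with
  | nil => simp
  | cons x t ih =>
    simp only [List.foldl_cons, List.filter_cons]
    rw [ih]
    by_cases hx : k x = v
    · rw [PySem.Dict.getD_insert, if_pos hx.symm]
      simp only [hx, decide_true, if_true, List.map_cons, List.sum_cons]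
      omega
    · rw [PySem.Dict.getD_insert, if_neg (fun h => hx h.symm)]
      simp [hx]

-- str.count with a single-character needle is the character count
theorem pv_count_go (c : Char) : ∀ (fuel : Nat) (l : List Char) (acc : Nat), l.length ≤ fuel →
    PySem.Chars.count.go [c] fuel l acc = acc + l.count c := by
  intro fuel
  induction fuel with
  | zero =>
    intro l acc h
    have hl : l = [] := List.eq_nil_of_length_eq_zero (by omega)
    subst hl
    simp [PySem.Chars.count.go]
  | succ fuel ih =>
    intro l acc h
    cases l with
    | nil => simp [PySem.Chars.count.go]
    | cons hd t =>
      rw [PySem.Chars.count.go]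
      by_cases hc : c = hd
      · subst hc
        rw [if_pos (by simp [List.isPrefixOf])]
        simp only [List.length_cons, List.length_nil, List.drop_succ_cons, List.drop_zero]
        rw [ih t (acc + 1) (by simpa using h)]
        simp
        omega
      · rw [if_neg (by simp [List.isPrefixOf, hc])]
        rw [ih t acc (by simpa using h)]
        simp [Ne.symm hc]
theorem pv_count_one (s : String) : PySem.Str.count s "1" = s.toList.count '1' := by
  rw [PySem.Str.count_eq]
  show PySem.Chars.count s.toList ['1'] = s.toList.count '1'
  unfold PySem.Chars.count
  rw [if_neg (by simp)]
  rw [pv_count_go '1' s.toList.length s.toList 0 le_rfl]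
  omega

theorem pv_parityFold_length (pt : String) (t : Nat) (base : List String) :
    ((List.range t).foldl (pvA_parityStep pt) base).length = base.length := by
  induction t with
  | zero => simp
  | succ t ih =>
    rw [List.range_succ, List.foldl_append, List.foldl_cons, List.foldl_nil]
    simp only [pvA_parityStep]
    rw [List.length_set]
    exact ih

-- positions whose 1-based index has ≥ t trailing zeros are untouched by the first t parity steps
theorem pv_agree (pt : String) (base : List String) (t : Nat) :
    ∀ p : Nat, t ≤ pvB_tz ((p + 1 : Nat) : Int) →
      ((List.range t).foldl (pvA_parityStep pt) base)[p]? = base[p]? := by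
  induction t with
  | zero => intro p _; simp
  | succ t ih =>
    intro p hp
    rw [List.range_succ, List.foldl_append, List.foldl_cons, List.foldl_nil]
    have hne : 2 ^ t - 1 ≠ p := by
      intro he
      have h1 : (1 : Nat) ≤ 2 ^ t := Nat.one_le_two_pow
      have h2 : p + 1 = 2 ^ t := by omega
      rw [show ((p + 1 : Nat) : Int) = (((2 ^ t : Nat) : Int)) from by rw [h2], pv_tz_two_pow] at hp
      omega
    simp only [pvA_parityStep]
    rw [List.getElem?_set_ne hne]
    exact ih p (by omega)

-- the stride range IS the bucket of positions with exactly t trailing zeros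
theorem pv_stride_eq_filter (t n : Nat) :
    PySem.List.pyRange (((2 ^ t : Nat) : Int) - 1) (n : Int) (2 * ((2 ^ t : Nat) : Int))
      = ((List.range n).filter (fun p => pvB_tz ((p + 1 : Nat) : Int) = t)).map (fun p : Nat => (p : Int)) := by
  have hpow1 : (1 : Nat) ≤ 2 ^ t := Nat.one_le_two_pow
  have hs : (0 : Int) < 2 * ((2 ^ t : Nat) : Int) := by positivity
  apply List.Perm.eq_of_pairwise (le := fun a b : Int => a < b)
  · intro a b _ _ hab hba; exact absurd (lt_trans hab hba) (lt_irrefl _)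
  · rw [PySem.List.pyRange_of_pos _ _ hs, List.pairwise_map]
    refine List.Pairwise.imp ?_ List.pairwise_lt_range
    intro k1 k2 hk
    have hk' : (k1 : Int) < k2 := by exact_mod_cast hk
    have := mul_lt_mul_of_pos_left hk' hs
    linarith
  · rw [List.pairwise_map]
    refine List.Pairwise.imp ?_ (List.Pairwise.filter _ List.pairwise_lt_range)
    intro a b h; exact_mod_cast h
  · rw [List.perm_ext_iff_of_nodup]
    · intro x
      rw [PySem.List.mem_pyRange_iff_of_pos hs]
      simp only [List.mem_map, List.mem_filter, List.mem_range]
      have hcast : ((2 ^ (t + 1) : Nat) : Int) = 2 * ((2 ^ t : Nat) : Int) := by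
        push_cast [pow_succ]; ring
      constructor
      · rintro ⟨hax, hxn, hdvd⟩
        have hx0 : 0 ≤ x := by omega
        have hle : 2 ^ t ≤ x.toNat + 1 := by omega
        refine ⟨x.toNat, ⟨by omega, ?_⟩, by omega⟩
        rw [decide_eq_true_eq, pv_tz_eq_iff t _ (by omega)]
        rw [← pv_stride_char t _ hle]
        have h2 : ((2 ^ (t + 1) : Nat) : Int) ∣ (((x.toNat + 1) - 2 ^ t : Nat) : Int) := by
          rw [hcast]
          have heq : (((x.toNat + 1) - 2 ^ t : Nat) : Int) = x - (((2 ^ t : Nat) : Int) - 1) := by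
            omega
          rw [heq]; exact hdvd
        exact_mod_cast h2
      · rintro ⟨p, ⟨hpn, htz⟩, rfl⟩
        rw [decide_eq_true_eq, pv_tz_eq_iff t _ (by omega)] at htz
        have hle : 2 ^ t ≤ p + 1 := by
          by_contra hlt
          rw [Nat.mod_eq_of_lt (lt_trans (by omega) (Nat.pow_lt_pow_succ (by omega)))] at htz
          omega
        have hdvd := (pv_stride_char t (p + 1) hle).mpr htz
        refine ⟨by omega, by exact_mod_cast hpn, ?_⟩
        rcases hdvd with ⟨u, hu⟩
        refine ⟨(u : Int), ?_⟩
        have h3 : p + 1 = 2 ^ (t + 1) * u + 2 ^ t := by omega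
        have h4 := congrArg (fun z : Nat => (z : Int)) h3
        push_cast [pow_succ] at h4 ⊢
        linarith
    · rw [PySem.List.pyRange_of_pos _ _ hs]
      refine List.Nodup.map ?_ List.nodup_range
      intro k1 k2 hk
      have h1 : ((2 * ((2 ^ t : Nat) : Int))) * k1 = ((2 * ((2 ^ t : Nat) : Int))) * k2 := by linarith
      have h2 := mul_left_cancel₀ (by positivity : (2 * ((2 ^ t : Nat) : Int)) ≠ 0) h1
      exact_mod_cast h2
    · refine List.Nodup.map ?_ (List.Nodup.filter _ List.nodup_range)
      intro a b h
      have h' : (a : Int) = (b : Int) := h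
      exact_mod_cast h'

-- A's strided ones count over a list equals B's bucket value
theorem pv_ones_eq_bucket (base : List String) (t : Nat) :
    (((PySem.List.pyRange (((2 ^ t : Nat) : Int) - 1) (base.length : Int) (2 * ((2 ^ t : Nat) : Int))).map
        (fun j => PySem.List.pyGetD base j "")).flatMap (fun bits => bits.toList)).countP (fun bit => bit == '1')
      = (pvB_counts base).getD t 0 := by
  rw [pv_stride_eq_filter t base.length, List.map_map, List.flatMap_map, List.countP_flatMap]
  unfold pvB_counts
  rw [PySem.List.len_eq, PySem.List.pyRange_zero_natCast, List.foldl_map]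
  have hstep : (fun (d : PySem.Dict Nat Nat) (x : Nat) => pvB_countStep base d ((x : Int)))
      = (fun (d : PySem.Dict Nat Nat) (x : Nat) =>
          d.insert (pvB_tz ((x : Int) + 1))
            (d.getD (pvB_tz ((x : Int) + 1)) 0 + PySem.Str.count (PySem.List.pyGetD base (x : Int) "") "1")) := by
    funext d x; rfl
  rw [hstep]
  rw [pv_getD_foldl_insert_add (List.range base.length)
        (fun x : Nat => pvB_tz ((x : Int) + 1))
        (fun x : Nat => PySem.Str.count (PySem.List.pyGetD base (x : Int) "") "1")
        PySem.Dict.empty t]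
  rw [PySem.Dict.getD_empty, Nat.zero_add]
  simp only [Nat.cast_add, Nat.cast_one, Function.comp]
  congr 1
  apply List.map_congr_left
  intro p hp
  rw [pv_count_one, List.count_eq_countP]
  rfl

theorem pv_main (pt : String) (r : Nat) (base : List String) :
    (List.range r).foldl (pvA_parityStep pt) base
      = (List.range r).foldl (pvB_setStep pt (pvB_counts base)) base := by
  induction r with
  | zero => rfl
  | succ r ih =>
    rw [List.range_succ, List.foldl_append, List.foldl_append,
        List.foldl_cons, List.foldl_cons, List.foldl_nil, List.foldl_nil, ← ih]
    simp only [pvA_parityStep, pvB_setStep]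
    refine congrArg (List.set ((List.range r).foldl (pvA_parityStep pt) base) (2 ^ r - 1)) ?_
    have hlen : PySem.List.len ((List.range r).foldl (pvA_parityStep pt) base) = (base.length : Int) := by
      rw [PySem.List.len_eq, pv_parityFold_length]
    rw [hlen]
    have hreads : ∀ j ∈ PySem.List.pyRange (((2 ^ r : Nat) : Int) - 1) (base.length : Int) (2 * ((2 ^ r : Nat) : Int)),
        PySem.List.pyGetD ((List.range r).foldl (pvA_parityStep pt) base) j ""
          = PySem.List.pyGetD base j "" := by
      intro j hj
      rw [pv_stride_eq_filter] at hj
      obtain ⟨p, hpmem, rfl⟩ := List.mem_map.mp hj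
      rw [List.mem_filter, decide_eq_true_eq] at hpmem
      rw [PySem.List.pyGetD_natCast, PySem.List.pyGetD_natCast,
          List.getD_eq_getElem?_getD, List.getD_eq_getElem?_getD,
          pv_agree pt base r p (ge_of_eq hpmem.2)]
    rw [List.map_congr_left hreads, PySem.List.sum_map_ite_one_zero (fun bit => bit == '1'),
        pv_ones_eq_bucket base r]
    by_cases hc : (pvB_counts base).getD r 0 % 2 = 0
    · simp [hc, show (((pvB_counts base).getD r 0 : Nat) : Int) % 2 = 0 from by omega]
    · simp [hc, show ¬ ((((pvB_counts base).getD r 0 : Nat) : Int) % 2 = 0) from by omega]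

-- ===== VERDICT (by name: the statement is the Claim_ definition above) =====
theorem calculate_hamming_code_spec : Claim_equal_calculate_hamming_code := by
  intro data_bits parity_type _
  unfold Spec_calculate_hamming_code calculate_hamming_code calculate_hamming_code_alt
  simp only [pv_r_eq, pv_place_eq, pv_main]
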